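-- pv_equiv track=rewrite | github.com/Wang-kaifei/PythonScript | Ecoli实验用脚本/new_winter/MSFragger/MSFragger_build_fasta.py | get_uniq_seq
-- ===== SOURCE A (Python) =====
-- import math
--
-- def same_mass(peptide):
--     site = []
--     pep = []
--     for i in range(0, len(peptide)):
--         if peptide[i] == 'L' or peptide[i] == 'I':
--             site.append(i)
--     for i in range(0, int(math.pow(2, len(site)))):
--         temp = list(peptide)
--         b = bin(i)[2:]  #得到二进制排列
--         for j in range(0, len(site) - len(b)):
--             b = "0" + b
--         for j in range(0, len(b)):
--             if b[j] == '1':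
--                 temp[site[j]] = 'L'
--             else:
--                 temp[site[j]] = 'I'
--         pep.append("".join(temp))
--     return pep
--
-- def get_uniq_seq(seqs):
--     """对传入的seq存储为set，且处理同构体问题"""
--     res = set()
--     for seq in seqs:
--         if 'I' in seq or 'L' in seq:
--             temps = same_mass(seq)
--             for temp in temps:
--                 res.add(temp)
--         else:
--             res.add(seq)
--     return res
-- ===== SOURCE B (Python) =====
-- def _variants(s):
--     """All I/L-isobaric variants of s, by branching each I/L position into both letters."""
--     if not s:
--         return ['']
--     rest = _variants(s[1:])
--     c = s[0]
--     if c in ('I', 'L'):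
--         return ['I' + r for r in rest] + ['L' + r for r in rest]
--     return [c + r for r in rest]
--
-- def get_uniq_seq(seqs):
--     """对传入的seq存储为set，且处理同构体问题"""
--     res = set()
--     for seq in seqs:
--         for v in _variants(seq):
--             res.add(v)
--     return res
-- ===== Notes on version B (the rewrite author's own statement) =====
-- stated objective: simpler
-- what changed: Replaces the binary-counting enumeration (loop i over range(2**k), zero-pad bin(i), substitute at recorded I/L site indices) by a structural recursion over the sequence that branches each I/L character into both letters, folding the no-I/L case into the same path.
import Mathlib
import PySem

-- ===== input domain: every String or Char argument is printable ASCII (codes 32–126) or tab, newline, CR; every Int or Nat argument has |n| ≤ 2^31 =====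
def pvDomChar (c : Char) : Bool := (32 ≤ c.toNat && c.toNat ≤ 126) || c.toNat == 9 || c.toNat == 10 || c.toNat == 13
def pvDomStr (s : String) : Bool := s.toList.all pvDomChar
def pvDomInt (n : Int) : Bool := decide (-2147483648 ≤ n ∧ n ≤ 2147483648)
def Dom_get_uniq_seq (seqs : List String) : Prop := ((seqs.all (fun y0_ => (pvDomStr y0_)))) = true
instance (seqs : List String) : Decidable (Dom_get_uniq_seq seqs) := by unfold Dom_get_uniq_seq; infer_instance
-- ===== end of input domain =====

-- B replaces the binary-counting enumeration (index i → zero-padded bin(i) string → in-place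
-- substitutions at recorded I/L sites) by a structural recursion over the sequence that branches
-- every I/L character into both letters; objective: simpler (the no-I/L case folds into the same path).

-- ===== PORT A =====
-- same_mass(peptide): 'int(math.pow(2, len(site)))' is ported as 2 ^ site.length — exact equality
-- for every exponent a terminating run can reach; 'bin(i)[2:]' (i ≥ 0 here) is the slice [2:] of
-- bin(i), i.e. dropping the "0b" prefix; '"".join(temp)' over a list of single characters is
-- String.ofList.  All subscript reads/writes use pyGetD/pySetD with a default that is never hit
-- when same_mass is reached from get_uniq_seq (the peptide then contains an 'I' or 'L').
def same_mass (peptide : String) : List String :=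
  let cs := peptide.toList
  -- for i in range(0, len(peptide)): if peptide[i] == 'L' or peptide[i] == 'I': site.append(i)
  let site : List Int := (PySem.List.pyRange 0 (cs.length : Int) 1).foldl
    (fun site i =>
      if PySem.List.pyGetD cs i ' ' = 'L' ∨ PySem.List.pyGetD cs i ' ' = 'I'
      then site ++ [i] else site) []
  -- for i in range(0, int(math.pow(2, len(site)))):
  (PySem.List.pyRange 0 ((2 : Int) ^ site.length) 1).foldl (fun pep i =>
    -- b = bin(i)[2:]
    let b0 : List Char := (PySem.Int.toBinChars0b i).drop 2
    -- for j in range(0, len(site) - len(b)): b = "0" + b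
    let b : List Char := (PySem.List.pyRange 0 ((site.length : Int) - (b0.length : Int)) 1).foldl
      (fun b _ => '0' :: b) b0
    -- for j in range(0, len(b)): temp[site[j]] = 'L' if b[j] == '1' else 'I'
    let temp : List Char := (PySem.List.pyRange 0 (b.length : Int) 1).foldl (fun temp j =>
      if PySem.List.pyGetD b j ' ' = '1'
      then PySem.List.pySetD temp (PySem.List.pyGetD site j 0) 'L'
      else PySem.List.pySetD temp (PySem.List.pyGetD site j 0) 'I') cs
    pep ++ [String.ofList temp]) []

def get_uniq_seq (seqs : List String) : List String :=
  seqs.foldl (fun res seq =>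
    if PySem.Str.isIn "I" seq || PySem.Str.isIn "L" seq then
      (same_mass seq).foldl (fun res temp => PySem.Set.add res temp) res
    else PySem.Set.add res seq) []

-- ===== PORT B =====
-- _variants(s): branch each I/L position into both letters, recursively.
def pvVariants : List Char → List (List Char)
  | [] => [[]]
  | c :: t =>
    let rest := pvVariants t
    if c = 'I' ∨ c = 'L' then
      rest.map (fun r => 'I' :: r) ++ rest.map (fun r => 'L' :: r)
    else rest.map (fun r => c :: r)

def get_uniq_seq_alt (seqs : List String) : List String :=
  seqs.foldl (fun res seq =>
    (pvVariants seq.toList).foldl (fun res v => PySem.Set.add res (String.ofList v)) res) []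

-- ===== PRECONDITION & SPEC =====
def Spec_get_uniq_seq (seqs : List String) (out : List String) : Prop := out = get_uniq_seq_alt seqs
instance (seqs : List String) (out : List String) : Decidable (Spec_get_uniq_seq seqs out) := by unfold Spec_get_uniq_seq; infer_instance

-- ===== CLAIM (what is proved, stated in full; the proofs are below) =====
def Claim_equal_get_uniq_seq : Prop := ∀ (seqs : List String), Dom_get_uniq_seq seqs → Spec_get_uniq_seq seqs (get_uniq_seq seqs)

-- ===== LEMMAS AND PROOFS =====

-- zero-padded width to k: what A's '"0" + b' loop produces
def padTo (k : Nat) (ys : List Char) : List Char := List.replicate (k - ys.length) '0' ++ ys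

-- '1' → 'L', other digit → 'I' (A's inner branch)
def bletter (c : Char) : Char := if c = '1' then 'L' else 'I'

-- structural binary digits (MSB first), fuel-indexed so it reduces definitionally
def binCharsF : Nat → Nat → List Char
  | 0, n => [Nat.digitChar (n % 2)]
  | f + 1, n => if n < 2 then [Nat.digitChar n] else binCharsF f (n / 2) ++ [Nat.digitChar (n % 2)]

def binChars (n : Nat) : List Char := binCharsF n n

-- positions of I/L characters
def sitesN : List Char → List Nat
  | [] => []
  | c :: t => if c = 'L' ∨ c = 'I' then 0 :: (sitesN t).map (· + 1) else (sitesN t).map (· + 1)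

-- assign the choice letters at the I/L positions, in order
def substC : List Char → List Char → List Char
  | [], _ => []
  | c :: t, ch =>
    if c = 'L' ∨ c = 'I' then
      match ch with
      | [] => c :: substC t []
      | x :: ch' => x :: substC t ch'
    else c :: substC t ch

-- the letter list encoded by index n in k bits, MSB first
def lettersOf : Nat → Nat → List Char
  | 0, _ => []
  | k + 1, n => (if 2 ^ k ≤ n then 'L' else 'I') :: lettersOf k (n % 2 ^ k)

-- all length-k letter lists in binary counting order ('I' = 0 first)
def allChoices : Nat → List (List Char)
  | 0 => [[]]
  | k + 1 => (allChoices k).map (fun ch => 'I' :: ch) ++ (allChoices k).map (fun ch => 'L' :: ch)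

lemma pyRange_nat (n : Nat) : PySem.List.pyRange 0 (n : Int) 1 = (List.range n).map (fun j : Nat => (j : Int)) := by
  rcases Nat.eq_zero_or_pos n with h | h <;> simp [PySem.List.pyRange, h]

lemma binCharsF_fuel : ∀ (n f₁ f₂ : Nat), n ≤ f₁ → n ≤ f₂ → binCharsF f₁ n = binCharsF f₂ n := by
  intro n
  induction n using Nat.strong_induction_on with
  | _ n ih =>
    intro f₁ f₂ h₁ h₂
    by_cases hn : n < 2
    · rcases f₁ with _ | f₁ <;> rcases f₂ with _ | f₂ <;>
        simp_all [binCharsF]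
    · rcases f₁ with _ | f₁; · omega
      rcases f₂ with _ | f₂; · omega
      simp only [binCharsF, if_neg hn]
      rw [ih (n / 2) (by omega) f₁ f₂ (by omega) (by omega)]

lemma binChars_lt_two (n : Nat) (h : n < 2) : binChars n = [Nat.digitChar n] := by
  interval_cases n <;> rfl

lemma binChars_two_le (n : Nat) (h : 2 ≤ n) :
    binChars n = binChars (n / 2) ++ [Nat.digitChar (n % 2)] := by
  unfold binChars
  rcases n with _ | m; · omega
  rw [show binCharsF (m + 1) (m + 1) = binCharsF m ((m + 1) / 2) ++ [Nat.digitChar ((m + 1) % 2)] by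
    simp [binCharsF, Nat.not_lt.mpr h]]
  rw [binCharsF_fuel ((m + 1) / 2) m ((m + 1) / 2) (by omega) (le_refl _)]

lemma toDigitsCore_eq_binChars : ∀ (f n : Nat) (l : List Char), n < f →
    Nat.toDigitsCore 2 f n l = binChars n ++ l := by
  intro f
  induction f with
  | zero => omega
  | succ f ih =>
    intro n l h
    by_cases hn : n / 2 = 0
    · have hn2 : n < 2 := by omega
      simp [Nat.toDigitsCore, hn, binChars_lt_two n hn2, Nat.mod_eq_of_lt hn2]
    · have hn2 : 2 ≤ n := by omega
      simp only [Nat.toDigitsCore, hn, if_false]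
      rw [ih (n / 2) _ (by omega), binChars_two_le n hn2]
      simp

lemma toDigits_two (n : Nat) : Nat.toDigits 2 n = binChars n := by
  have := toDigitsCore_eq_binChars (n + 1) n [] (by omega)
  simpa [Nat.toDigits] using this

lemma binChars_length : ∀ (k : Nat), 1 ≤ k → ∀ n < 2 ^ k, (binChars n).length ≤ k := by
  intro k
  induction k with
  | zero => omega
  | succ k ih =>
    intro _ n hn
    by_cases h2 : n < 2
    · rw [binChars_lt_two n h2]; simp
    · have hk : 1 ≤ k := by
        by_contra h
        have : k = 0 := by omega
        subst this; simp at hn; omega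
      rw [binChars_two_le n (by omega)]
      have : n / 2 < 2 ^ k := by
        have : n < 2 ^ k * 2 := by rw [← pow_succ]; exact hn
        omega
      have := ih hk (n / 2) this
      simp [List.length_append]; omega

lemma padTo_cons_zero (k : Nat) (ys : List Char) (h : ys.length ≤ k) :
    padTo (k + 1) ys = '0' :: padTo k ys := by
  unfold padTo
  rw [show k + 1 - ys.length = (k - ys.length) + 1 by omega, List.replicate_succ]
  simp

lemma padTo_append_one (k : Nat) (xs : List Char) (d : Char) :
    padTo (k + 1) (xs ++ [d]) = padTo k xs ++ [d] := by
  unfold padTo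
  rw [List.length_append, List.length_singleton,
    show k + 1 - (xs.length + 1) = k - xs.length by omega]
  simp

lemma padTo_eq_self (k : Nat) (ys : List Char) (h : k ≤ ys.length) : padTo k ys = ys := by
  unfold padTo
  rw [show k - ys.length = 0 by omega]
  simp

lemma padTo_length (k : Nat) (ys : List Char) (h : ys.length ≤ k) : (padTo k ys).length = k := by
  unfold padTo; simp; omega

lemma padStep (k : Nat) (hk : 1 ≤ k) (j : Nat) :
    padTo (k + 1) (binChars j) = padTo k (binChars (j / 2)) ++ [Nat.digitChar (j % 2)] := by
  by_cases h2 : j < 2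
  · have hj2 : j / 2 = 0 := by omega
    have hjm : j % 2 = j := by omega
    rw [hj2, hjm, binChars_lt_two j h2, binChars_lt_two 0 (by omega)]
    have hrep : List.replicate k '0' = List.replicate (k - 1) '0' ++ ['0'] := by
      rw [← List.replicate_succ']
      congr 1
      omega
    have h1 : k + 1 - 1 = k := by omega
    simp [padTo, h1, hrep, show Nat.digitChar 0 = '0' from rfl]
  · rw [binChars_two_le j (by omega), padTo_append_one]

lemma binChars_split : ∀ (k : Nat), 1 ≤ k → ∀ j < 2 ^ k,
    binChars (2 ^ k + j) = '1' :: padTo k (binChars j) := by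
  intro k
  induction k with
  | zero => omega
  | succ k ih =>
    intro _ j hj
    by_cases hk : k = 0
    · subst hk
      have hj' : j < 2 := by simpa using hj
      interval_cases j <;> rfl
    · have hk1 : 1 ≤ k := by omega
      have hp : 2 ^ (k + 1) = 2 * 2 ^ k := by ring
      have hsplit : (2 ^ (k + 1) + j) / 2 = 2 ^ k + j / 2 ∧ (2 ^ (k + 1) + j) % 2 = j % 2 := by
        constructor <;> omega
      rw [binChars_two_le (2 ^ (k + 1) + j) (by have := Nat.one_le_two_pow (n := k + 1); omega),
        hsplit.1, hsplit.2, ih hk1 (j / 2) (by omega)]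
      rw [List.cons_append, ← padStep k hk1 j]

lemma padLet : ∀ (k : Nat), 1 ≤ k → ∀ n < 2 ^ k,
    (padTo k (binChars n)).map bletter = lettersOf k n := by
  intro k
  induction k with
  | zero => omega
  | succ k ih =>
    intro _ n hn
    by_cases hk : k = 0
    · subst hk
      have hn' : n < 2 := by simpa using hn
      interval_cases n <;> rfl
    · have hk1 : 1 ≤ k := by omega
      by_cases hlt : n < 2 ^ k
      · rw [padTo_cons_zero k _ (binChars_length k hk1 n hlt)]
        simp only [List.map_cons]
        rw [ih hk1 n hlt]
        have : ¬ 2 ^ k ≤ n := by omega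
        simp [lettersOf, this, Nat.mod_eq_of_lt hlt, bletter]
      · have hle : 2 ^ k ≤ n := by omega
        obtain ⟨j, rfl⟩ : ∃ j, n = 2 ^ k + j := ⟨n - 2 ^ k, by omega⟩
        have hj : j < 2 ^ k := by
          have hp : 2 ^ (k + 1) = 2 * 2 ^ k := by ring
          omega
        rw [binChars_split k hk1 j hj]
        have hlen : (padTo k (binChars j)).length = k :=
          padTo_length k _ (binChars_length k hk1 j hj)
        rw [padTo_eq_self (k + 1) _ (by simp [hlen])]
        simp only [List.map_cons]
        rw [ih hk1 j hj]
        have hmod : (2 ^ k + j) % 2 ^ k = j := by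
          rw [Nat.add_mod_left, Nat.mod_eq_of_lt hj]
        simp [lettersOf, hle, hmod, bletter]

lemma range_letters : ∀ k : Nat, (List.range (2 ^ k)).map (lettersOf k) = allChoices k := by
  intro k
  induction k with
  | zero => rfl
  | succ k ih =>
    have hsplit : 2 ^ (k + 1) = 2 ^ k + 2 ^ k := by ring
    rw [hsplit, List.range_add, List.map_append, List.map_map]
    have h1 : (List.range (2 ^ k)).map (lettersOf (k + 1)) =
        (allChoices k).map (fun ch => 'I' :: ch) := by
      rw [← ih, List.map_map]
      apply List.map_congr_left
      intro i hi
      have hi' : i < 2 ^ k := List.mem_range.mp hi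
      simp [lettersOf, Function.comp, Nat.not_le.mpr hi', Nat.mod_eq_of_lt hi']
    have h2 : (List.range (2 ^ k)).map (lettersOf (k + 1) ∘ (fun x => 2 ^ k + x)) =
        (allChoices k).map (fun ch => 'L' :: ch) := by
      rw [← ih, List.map_map]
      apply List.map_congr_left
      intro j hj
      have hj' : j < 2 ^ k := List.mem_range.mp hj
      simp [lettersOf, Function.comp, Nat.le_add_right, Nat.add_mod_left,
        Nat.mod_eq_of_lt hj']
    rw [h1, h2]
    rfl

lemma foldl_set_shift : ∀ (idxs : List Nat) (ch : List Char) (a : Char) (t : List Char),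
    ((idxs.map (fun n : Nat => ((n + 1 : Nat) : Int))).zip ch).foldl
      (fun acc p => PySem.List.pySetD acc p.1 p.2) (a :: t)
    = a :: ((idxs.map (fun n : Nat => (n : Int))).zip ch).foldl
      (fun acc p => PySem.List.pySetD acc p.1 p.2) t := by
  intro idxs
  induction idxs with
  | nil => intro ch a t; simp
  | cons n ns ih =>
    intro ch a t
    cases ch with
    | nil => simp
    | cons x ch' =>
      simp only [List.map_cons, List.zip_cons_cons, List.foldl_cons]
      rw [PySem.List.pySetD_natCast, PySem.List.pySetD_natCast, List.set_cons_succ]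
      exact ih ch' a (t.set n x)

lemma zipset_eq_subst : ∀ (cs ch : List Char), ch.length = (sitesN cs).length →
    (((sitesN cs).map (fun n : Nat => (n : Int))).zip ch).foldl
      (fun acc p => PySem.List.pySetD acc p.1 p.2) cs = substC cs ch := by
  intro cs
  induction cs with
  | nil => intro ch h; simp [sitesN, substC]
  | cons c t ih =>
    intro ch h
    by_cases hIL : c = 'L' ∨ c = 'I'
    · simp only [sitesN, if_pos hIL] at h ⊢
      cases ch with
      | nil => simp at h
      | cons x ch' =>
        simp only [List.map_cons, List.zip_cons_cons, List.foldl_cons, List.map_map]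
        rw [show PySem.List.pySetD (c :: t) ((0 : Nat) : Int) x = x :: t from by
          rw [PySem.List.pySetD_natCast]; rfl]
        have hmm : (List.map ((fun n : Nat => (n : Int)) ∘ fun x => x + 1) (sitesN t))
            = (List.map (fun n : Nat => ((n + 1 : Nat) : Int)) (sitesN t)) := rfl
        rw [hmm, foldl_set_shift (sitesN t) ch' x t, ih ch' (by simpa using h)]
        simp [substC, hIL]
    · simp only [sitesN, if_neg hIL, List.map_map] at h ⊢
      have hmm : (List.map ((fun n : Nat => (n : Int)) ∘ fun x => x + 1) (sitesN t))
          = (List.map (fun n : Nat => ((n + 1 : Nat) : Int)) (sitesN t)) := rfl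
      rw [hmm, foldl_set_shift (sitesN t) ch c t, ih ch (by simpa using h)]
      simp [substC, hIL]

lemma foldl_range_getD {γ : Type} (f : γ → Int → Char → γ) :
    ∀ (b : List Char) (site : List Int), site.length = b.length → ∀ (init : γ),
    (List.range b.length).foldl (fun acc j => f acc (site.getD j 0) (b.getD j ' ')) init
    = (site.zip b).foldl (fun acc p => f acc p.1 p.2) init := by
  intro b
  induction b with
  | nil => intro site h init; simp
  | cons y ys ih =>
    intro site h init
    cases site with
    | nil => simp at h
    | cons x xs =>
      simp only [List.length_cons, List.range_succ_eq_map, List.foldl_cons, List.foldl_map,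
        List.zip_cons_cons]
      simp only [List.getD_cons_zero, List.getD_cons_succ]
      exact ih xs (by simpa using h) (f init x y)

lemma foldl_prepend (l : List Int) (b : List Char) :
    l.foldl (fun b _ => '0' :: b) b = List.replicate l.length '0' ++ b := by
  induction l generalizing b with
  | nil => simp
  | cons x xs ih =>
    simp only [List.foldl_cons, List.length_cons, ih ('0' :: b), List.replicate_succ']
    simp

lemma foldl_append_singleton {α β : Type} (f : α → β) (l : List α) (acc : List β) :
    l.foldl (fun acc x => acc ++ [f x]) acc = acc ++ l.map f := by
  induction l generalizing acc with
  | nil => simp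
  | cons x xs ih => simp [ih]

lemma siteA_eq : ∀ (cs : List Char) (g : Nat → Int) (acc : List Int),
    (List.range cs.length).foldl
      (fun site j => if cs.getD j ' ' = 'L' ∨ cs.getD j ' ' = 'I' then site ++ [g j] else site) acc
    = acc ++ (sitesN cs).map g := by
  intro cs
  induction cs with
  | nil => intro g acc; simp [sitesN]
  | cons c t ih =>
    intro g acc
    simp only [List.length_cons, List.range_succ_eq_map, List.foldl_cons, List.foldl_map]
    simp only [List.getD_cons_zero, List.getD_cons_succ]
    rw [show (fun site j => if t.getD j ' ' = 'L' ∨ t.getD j ' ' = 'I'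
        then site ++ [g (j + 1)] else site)
      = (fun site j => if t.getD j ' ' = 'L' ∨ t.getD j ' ' = 'I'
        then site ++ [(g ∘ Nat.succ) j] else site) from rfl]
    by_cases hIL : c = 'L' ∨ c = 'I'
    · rw [if_pos hIL, ih (g ∘ Nat.succ) (acc ++ [g 0])]
      simp [sitesN, hIL, List.map_map, Function.comp]
    · rw [if_neg hIL, ih (g ∘ Nat.succ) acc]
      simp [sitesN, hIL, List.map_map, Function.comp]

lemma sitesN_pos_iff : ∀ cs : List Char, 1 ≤ (sitesN cs).length ↔ ('I' ∈ cs ∨ 'L' ∈ cs) := by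
  intro cs
  induction cs with
  | nil => simp [sitesN]
  | cons c t ih =>
    by_cases hIL : c = 'L' ∨ c = 'I'
    · simp only [sitesN, if_pos hIL, List.length_cons, List.mem_cons]
      constructor
      · intro _
        rcases hIL with h | h <;> subst h <;> simp
      · intro _; omega
    · simp only [sitesN, if_neg hIL, List.length_map, List.mem_cons]
      rw [ih]
      push_neg at hIL
      constructor
      · tauto
      · rintro ((h | h) | (h | h))
        · exact absurd h.symm hIL.2
        · exact Or.inl h
        · exact absurd h.symm hIL.1
        · exact Or.inr h

lemma variants_eq : ∀ cs : List Char,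
    pvVariants cs = (allChoices (sitesN cs).length).map (substC cs) := by
  intro cs
  induction cs with
  | nil => rfl
  | cons c t ih =>
    by_cases hIL : c = 'L' ∨ c = 'I'
    · have hIL' : c = 'I' ∨ c = 'L' := hIL.symm
      have hsub : ∀ (x : Char) (ch : List Char), substC (c :: t) (x :: ch) = x :: substC t ch := by
        intro x ch
        simp [substC, hIL]
      simp only [pvVariants, if_pos hIL', sitesN, if_pos hIL, List.length_cons,
        List.length_map, allChoices, List.map_append, List.map_map, ih]
      congr 1
      · apply List.map_congr_left
        intro ch _
        simp [Function.comp, hsub]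
      · apply List.map_congr_left
        intro ch _
        simp [Function.comp, hsub]
    · have hIL' : ¬ (c = 'I' ∨ c = 'L') := fun h => hIL h.symm
      have hsub : ∀ ch : List Char, substC (c :: t) ch = c :: substC t ch := by
        intro ch
        simp [substC, hIL]
      simp only [pvVariants, if_neg hIL', sitesN, if_neg hIL, List.length_map, ih, List.map_map]
      apply List.map_congr_left
      intro ch _
      simp [Function.comp, hsub]

lemma substC_nil_of_no_sites (cs : List Char) (h : (sitesN cs).length = 0) :
    substC cs [] = cs := by
  induction cs with
  | nil => rfl
  | cons c t ih =>
    by_cases hIL : c = 'L' ∨ c = 'I'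
    · simp [sitesN, hIL] at h
    · simp only [sitesN, if_neg hIL, List.length_map] at h
      simp [substC, hIL, ih h]

lemma infix_singleton {a : Char} {l : List Char} : [a] <:+: l ↔ a ∈ l := by
  constructor
  · intro h; exact h.mem (List.mem_singleton_self a)
  · intro h
    obtain ⟨s, t, rfl⟩ := List.append_of_mem h
    exact ⟨s, t, by simp⟩

lemma isIn_char (a : Char) (lit : String) (s : String) (h : lit.toList = [a]) :
    (PySem.Str.isIn lit s = true) ↔ a ∈ s.toList := by
  rw [PySem.Str.isIn_iff_infix, h, infix_singleton]

-- the body of A's outer enumeration, at index n < 2^k, equals the substitution of lettersOf k n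
lemma same_mass_eq (seq : String) (h : 1 ≤ (sitesN seq.toList).length) :
    same_mass seq = (List.range (2 ^ (sitesN seq.toList).length)).map
      (fun n => String.ofList (substC seq.toList (lettersOf (sitesN seq.toList).length n))) := by
  simp only [same_mass]
  set cs := seq.toList with hcs
  set k := (sitesN cs).length with hk
  have hsite : (PySem.List.pyRange 0 (cs.length : Int) 1).foldl
      (fun site i =>
        if PySem.List.pyGetD cs i ' ' = 'L' ∨ PySem.List.pyGetD cs i ' ' = 'I'
        then site ++ [i] else site) ([] : List Int)
      = (sitesN cs).map (fun n : Nat => (n : Int)) := by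
    rw [pyRange_nat, List.foldl_map]
    simpa [PySem.List.pyGetD_natCast] using siteA_eq cs (fun n : Nat => (n : Int)) []
  rw [hsite]
  have hklen : ((sitesN cs).map (fun n : Nat => (n : Int))).length = k := by
    rw [List.length_map, ← hk]
  rw [hklen]
  have hpow : ((2 : Int) ^ k) = ((2 ^ k : Nat) : Int) := by push_cast; ring
  rw [hpow, pyRange_nat, List.foldl_map, foldl_append_singleton]
  simp only [List.nil_append]
  apply List.map_congr_left
  intro n hn
  have hn' : n < 2 ^ k := List.mem_range.mp hn
  -- b0 = binChars n
  have hb0 : (PySem.Int.toBinChars0b ((n : Nat) : Int)).drop 2 = binChars n := by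
    have hnn : ¬ ((n : Int) < 0) := by omega
    simp [PySem.Int.toBinChars0b, hnn, toDigits_two]
  rw [hb0]
  have hlen0 : (binChars n).length ≤ k := binChars_length k h n hn'
  -- padding loop = padTo k
  have hsub : ((k : Int) - ((binChars n).length : Int)) = ((k - (binChars n).length : Nat) : Int) := by
    omega
  rw [hsub, pyRange_nat, foldl_prepend]
  have hpad : List.replicate ((List.range (k - (binChars n).length)).map
      (fun j : Nat => (j : Int))).length '0' ++ binChars n = padTo k (binChars n) := by
    simp [padTo]
  rw [hpad]
  have hblen : (padTo k (binChars n)).length = k := padTo_length k _ hlen0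
  rw [hblen, pyRange_nat, List.foldl_map]
  have hmerge : (fun (temp : List Char) (j : Nat) =>
      if PySem.List.pyGetD (padTo k (binChars n)) (j : Int) ' ' = '1'
      then PySem.List.pySetD temp (PySem.List.pyGetD ((sitesN cs).map (fun n : Nat => (n : Int))) (j : Int) 0) 'L'
      else PySem.List.pySetD temp (PySem.List.pyGetD ((sitesN cs).map (fun n : Nat => (n : Int))) (j : Int) 0) 'I')
      = (fun (temp : List Char) (j : Nat) =>
        PySem.List.pySetD temp
          (((sitesN cs).map (fun n : Nat => (n : Int))).getD j 0)
          (bletter ((padTo k (binChars n)).getD j ' '))) := by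
    funext temp j
    rw [PySem.List.pyGetD_natCast, PySem.List.pyGetD_natCast]
    unfold bletter
    split_ifs <;> simp [PySem.List.pyGetD_natCast]
  rw [hmerge]
  have hrange : (List.range k) = List.range (padTo k (binChars n)).length := by rw [hblen]
  rw [hrange]
  have hfold := foldl_range_getD (fun acc i ch => PySem.List.pySetD acc i (bletter ch))
    (padTo k (binChars n)) ((sitesN cs).map (fun m : Nat => (m : Int)))
    (by rw [List.length_map, hblen, ← hk]) cs
  beta_reduce at hfold
  rw [hfold]
  have hzip : (((sitesN cs).map (fun n : Nat => (n : Int))).zip (padTo k (binChars n))).foldl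
      (fun acc p => PySem.List.pySetD acc p.1 (bletter p.2)) cs
      = (((sitesN cs).map (fun n : Nat => (n : Int))).zip ((padTo k (binChars n)).map bletter)).foldl
      (fun acc p => PySem.List.pySetD acc p.1 p.2) cs := by
    rw [List.zip_map_right, List.foldl_map]
    simp [Prod.map_fst, Prod.map_snd]
  rw [hzip, zipset_eq_subst cs _ (by rw [List.length_map, hblen, ← hk]),
    padLet k h n hn']

-- per-element agreement of the two folds
lemma step_eq (res : List String) (seq : String) :
    (if PySem.Str.isIn "I" seq || PySem.Str.isIn "L" seq then
      (same_mass seq).foldl (fun res temp => PySem.Set.add res temp) res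
    else PySem.Set.add res seq)
    = (pvVariants seq.toList).foldl (fun res v => PySem.Set.add res (String.ofList v)) res := by
  by_cases h : 'I' ∈ seq.toList ∨ 'L' ∈ seq.toList
  · have hI : (PySem.Str.isIn "I" seq || PySem.Str.isIn "L" seq) = true := by
      rw [Bool.or_eq_true]
      rcases h with h | h
      · exact Or.inl ((isIn_char 'I' "I" seq (by decide)).mpr h)
      · exact Or.inr ((isIn_char 'L' "L" seq (by decide)).mpr h)
    rw [if_pos hI]
    have hk : 1 ≤ (sitesN seq.toList).length := (sitesN_pos_iff seq.toList).mpr h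
    rw [same_mass_eq seq hk, variants_eq seq.toList, ← range_letters, List.map_map,
      List.foldl_map, List.foldl_map]
    rfl
  · push_neg at h
    have hA : PySem.Str.isIn "I" seq = false := by
      rw [Bool.eq_false_iff]
      intro hc
      exact h.1 ((isIn_char 'I' "I" seq (by decide)).mp hc)
    have hB : PySem.Str.isIn "L" seq = false := by
      rw [Bool.eq_false_iff]
      intro hc
      exact h.2 ((isIn_char 'L' "L" seq (by decide)).mp hc)
    rw [if_neg (by rw [hA, hB]; simp)]
    have hk : (sitesN seq.toList).length = 0 := by
      by_contra hc
      rcases (sitesN_pos_iff seq.toList).mp (by omega) with hi | hl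
      · exact h.1 hi
      · exact h.2 hl
    rw [variants_eq seq.toList, hk]
    simp only [allChoices, List.map_cons, List.map_nil, List.foldl_cons, List.foldl_nil]
    rw [substC_nil_of_no_sites seq.toList hk]
    simp

lemma fold_eq : ∀ (seqs : List String) (res : List String),
    seqs.foldl (fun res seq =>
      if PySem.Str.isIn "I" seq || PySem.Str.isIn "L" seq then
        (same_mass seq).foldl (fun res temp => PySem.Set.add res temp) res
      else PySem.Set.add res seq) res
    = seqs.foldl (fun res seq =>
        (pvVariants seq.toList).foldl (fun res v => PySem.Set.add res (String.ofList v)) res) res := by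
  intro seqs
  induction seqs with
  | nil => intro res; rfl
  | cons x xs ih =>
    intro res
    rw [List.foldl_cons, List.foldl_cons, step_eq res x]
    exact ih _

-- ===== VERDICT (by name: the statement is the Claim_ definition above) =====
theorem get_uniq_seq_spec : Claim_equal_get_uniq_seq := by
  intro seqs _
  unfold Spec_get_uniq_seq get_uniq_seq get_uniq_seq_alt
  exact fold_eq seqs []
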